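-- pv_equiv track=rewrite | github.com/armallah/warshall-algorithm | main.py | __getCartesian
-- ===== SOURCE A (Python) =====
-- import itertools
--
-- def __getCartesian(a, b):
--     cartesian = []
--     if (len(a) == 0 or len(b) == 0):
--         return []
--     else:
--         for element in itertools.product(a, b):
--             if element not in cartesian:
--                 cartesian.append(element)
--         return cartesian
-- ===== SOURCE B (Python) =====
-- import itertools
--
-- def __getCartesian(a, b):
--     da = []
--     for x in a:
--         if x not in da:
--             da.append(x)
--     db = []
--     for y in b:
--         if y not in db:
--             db.append(y)
--     return list(itertools.product(da, db))
-- ===== Notes on version B (the rewrite author's own statement) =====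
-- stated objective: faster
-- what changed: Instead of deduplicating the full cartesian product with a membership scan over the growing result, B deduplicates a and b separately with two small order-preserving passes and then takes the plain product, which is already duplicate-free.
import Mathlib
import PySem

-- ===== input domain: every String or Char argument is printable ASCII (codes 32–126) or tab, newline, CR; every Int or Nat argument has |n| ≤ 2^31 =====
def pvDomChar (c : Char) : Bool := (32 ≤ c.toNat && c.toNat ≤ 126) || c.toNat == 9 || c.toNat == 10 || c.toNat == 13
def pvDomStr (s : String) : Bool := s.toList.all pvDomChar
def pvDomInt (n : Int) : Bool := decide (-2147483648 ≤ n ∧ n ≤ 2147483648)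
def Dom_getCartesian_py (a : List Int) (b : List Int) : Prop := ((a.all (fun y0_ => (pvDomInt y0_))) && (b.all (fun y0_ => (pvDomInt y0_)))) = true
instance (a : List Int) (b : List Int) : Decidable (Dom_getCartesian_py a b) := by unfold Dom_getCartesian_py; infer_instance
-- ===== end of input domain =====

-- B deduplicates a and b separately and takes the plain product, instead of deduplicating the whole product; asymptotically faster.


-- ===== PORT A =====
-- itertools.product(a, b) as a flat list of pairs (tuples ported as 2-element lists)
def pvProduct (a : List Int) (b : List Int) : List (List Int) :=
  a.flatMap (fun x => b.map (fun y => [x, y]))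

def getCartesian_py (a : List Int) (b : List Int) : List (List Int) :=
  if a.length = 0 ∨ b.length = 0 then []
  else (pvProduct a b).foldl (fun cartesian e => if e ∈ cartesian then cartesian else cartesian ++ [e]) []

-- ===== PORT B =====
-- order-preserving dedup by membership in the growing list (B's loops)
def pvDedup (xs : List Int) : List Int :=
  xs.foldl (fun acc x => if x ∈ acc then acc else acc ++ [x]) []

def getCartesian_py_alt (a : List Int) (b : List Int) : List (List Int) :=
  (pvDedup a).flatMap (fun x => (pvDedup b).map (fun y => [x, y]))

-- ===== PRECONDITION & SPEC =====
def Spec_getCartesian_py (a : List Int) (b : List Int) (out : List (List Int)) : Prop := out = getCartesian_py_alt a b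
instance (a : List Int) (b : List Int) (out : List (List Int)) : Decidable (Spec_getCartesian_py a b out) := by unfold Spec_getCartesian_py; infer_instance

-- ===== CLAIM (what is proved, stated in full; the proofs are below) =====
def Claim_equal_getCartesian_py : Prop := ∀ (a : List Int) (b : List Int), Dom_getCartesian_py a b → Spec_getCartesian_py a b (getCartesian_py a b)

-- ===== LEMMAS AND PROOFS =====

-- ddup seen xs: the elements of xs not in seen, first occurrences, in order
def ddup {α : Type} [DecidableEq α] (seen : List α) : List α → List α
  | [] => []
  | x :: xs => if x ∈ seen then ddup seen xs else x :: ddup (x :: seen) xs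

theorem ddup_congr {α : Type} [DecidableEq α] (xs : List α) :
    ∀ s t : List α, (∀ z, z ∈ s ↔ z ∈ t) → ddup s xs = ddup t xs := by
  induction xs with
  | nil => intro s t h; rfl
  | cons x xs ih =>
    intro s t h
    simp only [ddup]
    by_cases hx : x ∈ s
    · rw [if_pos hx, if_pos ((h x).mp hx)]; exact ih s t h
    · rw [if_neg hx, if_neg (fun hxt => hx ((h x).mpr hxt))]
      congr 1
      exact ih (x :: s) (x :: t) (by intro z; simp [h z])

theorem foldl_ddup {α : Type} [DecidableEq α] (xs : List α) :
    ∀ acc : List α,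
      xs.foldl (fun acc x => if x ∈ acc then acc else acc ++ [x]) acc = acc ++ ddup acc xs := by
  induction xs with
  | nil => intro acc; simp [ddup]
  | cons x xs ih =>
    intro acc
    simp only [List.foldl, ddup]
    by_cases hx : x ∈ acc
    · rw [if_pos hx, if_pos hx, ih]
    · rw [if_neg hx, if_neg hx, ih]
      rw [ddup_congr xs (acc ++ [x]) (x :: acc) (by intro z; simp; tauto)]
      simp

theorem ddup_all_mem {α : Type} [DecidableEq α] (xs : List α) :
    ∀ s : List α, (∀ z ∈ xs, z ∈ s) → ddup s xs = [] := by
  induction xs with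
  | nil => intro s _; rfl
  | cons x xs ih =>
    intro s h
    simp only [ddup, if_pos (h x (by simp))]
    exact ih s (fun z hz => h z (by simp [hz]))

theorem ddup_map {α β : Type} [DecidableEq α] [DecidableEq β] (f : α → β)
    (hf : ∀ x y, f x = f y → x = y) (b : List α) :
    ∀ (S : List β) (t : List α), (∀ y, f y ∈ S ↔ y ∈ t) →
      ddup S (b.map f) = (ddup t b).map f := by
  induction b with
  | nil => intro S t _; rfl
  | cons y b ih =>
    intro S t h
    simp only [List.map, ddup]
    by_cases hy : y ∈ t
    · rw [if_pos ((h y).mpr hy), if_pos hy]; exact ih S t h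
    · rw [if_neg (fun hS => hy ((h y).mp hS)), if_neg hy]
      simp only [List.map]
      congr 1
      exact ih (f y :: S) (y :: t) (by
        intro z; simp only [List.mem_cons]
        constructor
        · rintro (hz | hz)
          · exact Or.inl (hf z y hz)
          · exact Or.inr ((h z).mp hz)
        · rintro (hz | hz)
          · exact Or.inl (by rw [hz])
          · exact Or.inr ((h z).mpr hz))

theorem ddup_append {α : Type} [DecidableEq α] (xs : List α) :
    ∀ (ys S : List α), ddup S (xs ++ ys) = ddup S xs ++ ddup (xs ++ S) ys := by
  induction xs with
  | nil => intro ys S; rfl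
  | cons x xs ih =>
    intro ys S
    simp only [List.cons_append, ddup]
    by_cases hx : x ∈ S
    · rw [if_pos hx, if_pos hx, ih]
      congr 1
      exact ddup_congr ys (xs ++ S) (x :: xs ++ S) (by
        intro z
        simp only [List.cons_append, List.mem_cons, List.mem_append]
        constructor
        · tauto
        · rintro (rfl | h | h)
          exacts [Or.inr hx, Or.inl h, Or.inr h])
    · rw [if_neg hx, if_neg hx]
      simp only [List.cons_append, ih]
      congr 2
      exact ddup_congr ys (xs ++ x :: S) (x :: (xs ++ S)) (by intro z; simp; tauto)

theorem mem_pvProduct {s b : List Int} {z : List Int} :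
    z ∈ pvProduct s b ↔ ∃ x ∈ s, ∃ y ∈ b, z = [x, y] := by
  simp [pvProduct, eq_comm]

theorem ddup_product (b : List Int) (a : List Int) :
    ∀ s : List Int,
      ddup (pvProduct s b) (pvProduct a b) = pvProduct (ddup s a) (ddup [] b) := by
  induction a with
  | nil => intro s; simp [pvProduct, ddup]
  | cons x a ih =>
    intro s
    have hrow : pvProduct (x :: a) b = b.map (fun y => [x, y]) ++ pvProduct a b := by
      simp [pvProduct]
    rw [hrow, ddup_append]
    by_cases hx : x ∈ s
    · have h1 : ddup (pvProduct s b) (b.map (fun y => [x, y])) = [] := by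
        apply ddup_all_mem
        intro z hz
        simp only [List.mem_map] at hz
        obtain ⟨y, hy, rfl⟩ := hz
        exact mem_pvProduct.mpr ⟨x, hx, y, hy, rfl⟩
      rw [h1]
      have h2 : ddup (b.map (fun y => [x, y]) ++ pvProduct s b) (pvProduct a b)
          = ddup (pvProduct s b) (pvProduct a b) := by
        apply ddup_congr
        intro z
        simp only [List.mem_append]
        constructor
        · rintro (hz | hz)
          · simp only [List.mem_map] at hz
            obtain ⟨y, hy, rfl⟩ := hz
            exact mem_pvProduct.mpr ⟨x, hx, y, hy, rfl⟩
          · exact hz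
        · exact Or.inr
      rw [h2, ih s]
      simp [ddup, hx]
    · have h1 : ddup (pvProduct s b) (b.map (fun y => [x, y]))
          = (ddup [] b).map (fun y => [x, y]) := by
        apply ddup_map _ (by intro u v h; simpa using h) b _ []
        intro y
        simp only [List.not_mem_nil, iff_false]
        intro hmem
        obtain ⟨x', hx', y', _, hz⟩ := mem_pvProduct.mp hmem
        simp at hz
        exact hx (hz.1 ▸ hx')
      have h2 : b.map (fun y => [x, y]) ++ pvProduct s b = pvProduct (x :: s) b := by
        simp [pvProduct]
      rw [h1, h2, ih (x :: s)]
      simp [ddup, hx, pvProduct]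

-- ===== VERDICT (by name: the statement is the Claim_ definition above) =====
theorem getCartesian_py_spec : Claim_equal_getCartesian_py := by
  intro a b _
  show getCartesian_py a b = getCartesian_py_alt a b
  unfold getCartesian_py getCartesian_py_alt
  split
  · rename_i h
    rcases h with h | h
    · rw [List.length_eq_zero_iff] at h
      subst h
      simp [pvDedup]
    · rw [List.length_eq_zero_iff] at h
      subst h
      simp [pvDedup]
  · have hA : List.foldl (fun cartesian e => if e ∈ cartesian then cartesian else cartesian ++ [e])
        ([] : List (List Int)) (pvProduct a b) = [] ++ ddup [] (pvProduct a b) := by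
      rw [← foldl_ddup]
      congr 1
      funext acc x
      congr
    rw [hA, List.nil_append]
    have h0 := ddup_product b a []
    rw [show pvProduct ([] : List Int) b = [] from rfl] at h0
    rw [h0]
    have hd : ∀ xs : List Int, pvDedup xs = ddup [] xs := by
      intro xs
      have h := foldl_ddup xs ([] : List Int)
      simpa [pvDedup] using h
    rw [hd a, hd b]
    rfl
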